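-- pv_equiv track=rewrite | github.com/rishibhtngr01-Cloud-URL/ipl_dashboard | app.py | add_td_classes
-- ===== SOURCE A (Python) =====
-- def add_td_classes(table_html: str) -> str:
--     out = []
--     in_row = False
--     td_index = 0
--     for part in table_html.split("<td"):
--         if not in_row:
--             # before the first <td of the document
--             out.append(part)
--             in_row = True
--             continue
--         # Each split chunk starts at after "<td"
--         # We need to know which td number we are in within a row. Reset after </tr>.
--         chunk = "<td" + part
--         # Reset on new row boundary
--         if "</tr>" in out[-1]:
--             td_index = 0
--
--         td_index += 1
--         if td_index == 1:
--             chunk = chunk.replace("<td>", '<td class="col-rank">', 1)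
--         elif td_index == 7:
--             chunk = chunk.replace("<td>", '<td class="col-pts">', 1)
--         else:
--             # numeric columns (P,W,L,NR,Win%) right align for readability
--             # Team stays default because it's a link
--             if td_index in (3,4,5,6,8):
--                 chunk = chunk.replace("<td>", '<td class="num">', 1)
--
--         out.append(chunk)
--     return "".join(out)
-- ===== SOURCE B (Python) =====
-- _TD_CLASS = {1: '<td class="col-rank">', 7: '<td class="col-pts">',
--              3: '<td class="num">', 4: '<td class="num">',
--              5: '<td class="num">', 6: '<td class="num">', 8: '<td class="num">'}
--
--
-- def add_td_classes(table_html: str) -> str: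
--     # One pass over the document: walk the string once, counting every "<td"
--     # and resetting the column counter at each "</tr>"; rewrite bare "<td>"
--     # cells in place.  No split/replace/join round-trips.
--     out = []
--     i = 0
--     col = 0
--     n = len(table_html)
--     while i < n:
--         if table_html.startswith("</tr>", i):
--             out.append("</tr>")
--             i += 5
--             col = 0
--         elif table_html.startswith("<td", i):
--             col += 1
--             repl = _TD_CLASS.get(col)
--             if repl is not None and table_html.startswith("<td>", i):
--                 out.append(repl)
--                 i += 4
--             else:
--                 out.append("<td")
--                 i += 3
--         else:
--             out.append(table_html[i])
--             i += 1
--     return "".join(out)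
-- ===== Notes on version B (the rewrite author's own statement) =====
-- stated objective: alternative
-- what changed: Replaces A's split-on-'<td' / per-chunk replace(...,1) / join pipeline (with its look-back at the previously emitted chunk for the '</tr>' row reset) by a single left-to-right scan of the string that matches '</tr>' and '<td' tokens in place with a running column counter, rewriting bare '<td>' cells as it goes.
import Mathlib
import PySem

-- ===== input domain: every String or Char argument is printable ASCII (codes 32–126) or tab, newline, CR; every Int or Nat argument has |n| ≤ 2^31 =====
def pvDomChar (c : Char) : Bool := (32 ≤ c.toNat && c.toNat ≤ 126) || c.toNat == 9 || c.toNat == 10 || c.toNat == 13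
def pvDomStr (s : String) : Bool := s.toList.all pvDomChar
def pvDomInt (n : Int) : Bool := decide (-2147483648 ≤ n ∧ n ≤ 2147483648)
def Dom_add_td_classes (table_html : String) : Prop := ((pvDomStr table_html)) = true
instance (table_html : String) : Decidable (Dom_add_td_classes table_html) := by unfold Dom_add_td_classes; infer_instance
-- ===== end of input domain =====

-- B replaces A's split-on-"<td" / per-chunk replace / join pipeline by a single left-to-right
-- scan with a running column counter (objective: alternative; same O(n) cost).

-- shared string literals (data only)
def tdL : List Char := ['<', 't', 'd']
def tdO : List Char := ['<', 't', 'd', '>']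
def trL : List Char := ['<', '/', 't', 'r', '>']
def clsRank : List Char := ['<','t','d',' ','c','l','a','s','s','=','"','c','o','l','-','r','a','n','k','"','>']
def clsPts : List Char := ['<','t','d',' ','c','l','a','s','s','=','"','c','o','l','-','p','t','s','"','>']
def clsNum : List Char := ['<','t','d',' ','c','l','a','s','s','=','"','n','u','m','"','>']

-- ===== PORT A =====
-- s.replace(old, new, 1): count-limited replace; exact for nonempty old (PySem has no count form)
def pyReplace1 (s old new : List Char) : List Char :=
  match s with
  | [] => []
  | c :: t =>
    if old.isPrefixOf (c :: t) then new ++ (c :: t).drop old.length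
    else c :: pyReplace1 t old new

-- one iteration of A's `for part in table_html.split("<td")` loop; state = (out, in_row, td_index)
def addTdStep (st : List (List Char) × Bool × Int) (part : List Char) :
    List (List Char) × Bool × Int :=
  match st with
  | (out, in_row, td_index) =>
    if in_row = false then (out ++ [part], true, td_index)
    else
      let chunk := tdL ++ part
      -- out[-1]: out is nonempty whenever in_row is true (the first part was appended first)
      let td_index := if PySem.Chars.isIn trL (out.getLast?.getD []) then 0 else td_index
      let td_index := td_index + 1
      let chunk :=
        if td_index = 1 then pyReplace1 chunk tdO clsRank
        else if td_index = 7 then pyReplace1 chunk tdO clsPts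
        else if td_index = 3 ∨ td_index = 4 ∨ td_index = 5 ∨ td_index = 6 ∨ td_index = 8 then
          pyReplace1 chunk tdO clsNum
        else chunk
      (out ++ [chunk], in_row, td_index)

def add_td_classes (table_html : String) : String :=
  let parts := PySem.Chars.splitOn table_html.toList tdL
  let st := parts.foldl addTdStep ([], false, 0)
  String.ofList (PySem.Chars.join [] st.1)

-- ===== PORT B =====
-- B's _td_class helper: the full replacement tag for column col, or none
def tdClass (col : Int) : Option (List Char) :=
  if col = 1 then some clsRank
  else if col = 7 then some clsPts
  else if col = 3 ∨ col = 4 ∨ col = 5 ∨ col = 6 ∨ col = 8 then some clsNum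
  else none

-- B's while loop over index i, transcribed as recursion on the remaining characters
-- (each iteration advances i by 5 / 4 / 3 / 1, i.e. consumes that many characters)
def altGo (s : List Char) (col : Int) : List Char :=
  match s with
  | [] => []
  | c :: t =>
    if trL.isPrefixOf (c :: t) then
      trL ++ altGo ((c :: t).drop 5) 0
    else if tdL.isPrefixOf (c :: t) then
      match tdClass (col + 1), tdO.isPrefixOf (c :: t) with
      | some repl, true => repl ++ altGo ((c :: t).drop 4) (col + 1)
      | _, _ => tdL ++ altGo ((c :: t).drop 3) (col + 1)
    else
      c :: altGo t col
termination_by s.length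
decreasing_by all_goals (simp only [List.length_drop, List.length_cons]; omega)

def add_td_classes_alt (table_html : String) : String :=
  String.ofList (altGo table_html.toList 0)

-- ===== PRECONDITION & SPEC =====
def Spec_add_td_classes (table_html : String) (out : String) : Prop := out = add_td_classes_alt table_html
instance (table_html : String) (out : String) : Decidable (Spec_add_td_classes table_html out) := by unfold Spec_add_td_classes; infer_instance

-- ===== CLAIM (what is proved, stated in full; the proofs are below) =====
def Claim_equal_add_td_classes : Prop := ∀ (table_html : String), Dom_add_td_classes table_html → Spec_add_td_classes table_html (add_td_classes table_html)

-- ===== LEMMAS AND PROOFS =====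

-- clean recursion computing Python's split("<td") as (head, tail parts)
def splitTd (l : List Char) : List Char × List (List Char) :=
  match l with
  | [] => ([], [])
  | c :: t =>
    if tdL.isPrefixOf (c :: t) then
      ([], (splitTd (t.drop 2)).1 :: (splitTd (t.drop 2)).2)
    else
      (c :: (splitTd t).1, (splitTd t).2)
termination_by l.length
decreasing_by all_goals (simp only [List.length_drop, List.length_cons]; omega)

-- the chunk A appends for a part p at (post-reset) column index k1
def chunkOf (p : List Char) (k1 : Int) : List Char :=
  match tdClass k1 with
  | some repl => if p.head? = some '>' then repl ++ p.tail else tdL ++ p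
  | none => tdL ++ p

-- A's remaining loop, with the row-reset test applied eagerly to the part itself
def goParts (ps : List (List Char)) (k : Int) : List Char :=
  match ps with
  | [] => []
  | p :: ps =>
    chunkOf p (k + 1) ++ goParts ps (if PySem.Chars.isIn trL p then 0 else k + 1)

lemma joinNil (l : List (List Char)) : PySem.Chars.join [] l = l.flatten := by
  induction l with
  | nil => simp [PySem.Chars.join, List.intercalate]
  | cons h t ih =>
    cases t with
    | nil => simp [PySem.Chars.join, List.intercalate, List.intersperse]
    | cons h2 t2 =>
      simp [PySem.Chars.join, List.intercalate, List.intersperse] at ih ⊢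
      exact ih

lemma splitOn_go_eq (fuel : ℕ) : ∀ (l cur : List Char) (accL : List (List Char)),
    l.length ≤ fuel →
    PySem.Chars.splitOn.go tdL fuel l cur accL =
      accL.reverse ++ (cur.reverse ++ (splitTd l).1) :: (splitTd l).2 := by
  induction fuel with
  | zero =>
    intro l cur acc hl
    have hl0 : l = [] := List.eq_nil_of_length_eq_zero (Nat.le_zero.mp hl)
    subst hl0
    simp [PySem.Chars.splitOn.go, splitTd]
  | succ f ih =>
    intro l cur acc hl
    cases l with
    | nil => simp [PySem.Chars.splitOn.go, splitTd]
    | cons c t =>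
      rw [PySem.Chars.splitOn.go, splitTd]
      by_cases h : tdL.isPrefixOf (c :: t)
      · simp only [h, if_true]
        rw [ih (List.drop tdL.length (c :: t)) [] (cur.reverse :: acc)
            (by simp [tdL] at hl ⊢; omega)]
        simp [tdL]
      · simp only [h]
        rw [ih t (c :: cur) acc (by simp at hl; omega)]
        simp

lemma splitOn_eq (l : List Char) :
    PySem.Chars.splitOn l tdL = (splitTd l).1 :: (splitTd l).2 := by
  rw [PySem.Chars.splitOn, splitOn_go_eq (l.length + 1) l [] [] (by omega)]
  simp

lemma splitTd_recover (l : List Char) :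
    (splitTd l).1 ++ ((splitTd l).2).flatMap (fun p => tdL ++ p) = l := by
  induction l using splitTd.induct with
  | case1 => simp [splitTd]
  | case2 c t h ih =>
    rw [splitTd]
    simp only [h, if_true]
    obtain ⟨w, hw⟩ := List.isPrefixOf_iff_prefix.mp h
    obtain ⟨rfl, rfl⟩ : c = '<' ∧ t = 't' :: 'd' :: w := by
      simpa [tdL] using hw.symm
    simp only [List.drop_succ_cons, List.drop_zero] at ih
    simpa [tdL] using ih
  | case3 c t h ih =>
    rw [splitTd]
    simp only [h]
    simpa using ih

lemma splitTd_head_no_td (l : List Char) : ¬ tdL <:+: (splitTd l).1 := by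
  induction l using splitTd.induct with
  | case1 => simp [splitTd, tdL]
  | case2 c t h ih => rw [splitTd]; simp only [h, if_true]; simp [tdL]
  | case3 c t h ih =>
    rw [splitTd]
    simp only [h]
    intro hinf
    rcases List.infix_cons_iff.mp hinf with hpre | hinf2
    · have h1 : (splitTd t).1 <+: t :=
        ⟨((splitTd t).2).flatMap (fun p => tdL ++ p), splitTd_recover t⟩
      have h2 : tdL <+: c :: t := hpre.trans (List.cons_prefix_cons.mpr ⟨rfl, h1⟩)
      exact h (List.isPrefixOf_iff_prefix.mpr h2)
    · exact ih hinf2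

lemma splitTd_parts_no_td (l : List Char) : ∀ p ∈ (splitTd l).2, ¬ tdL <:+: p := by
  induction l using splitTd.induct with
  | case1 => simp [splitTd]
  | case2 c t h ih =>
    rw [splitTd]
    simp only [h, if_true]
    intro p hp
    rcases List.mem_cons.mp hp with rfl | hp2
    · exact splitTd_head_no_td _
    · exact ih p hp2
  | case3 c t h ih =>
    rw [splitTd]; simp only [h]; exact ih

lemma pyReplace1_of_not_infix (s old new : List Char) (h : ¬ old <:+: s) :
    pyReplace1 s old new = s := by
  induction s with
  | nil => simp [pyReplace1]
  | cons c t ih =>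
    rw [pyReplace1]
    rw [List.infix_cons_iff, not_or] at h
    rw [if_neg (fun hp => h.1 (List.isPrefixOf_iff_prefix.mp hp))]
    rw [ih h.2]

lemma pyReplace1_bare (p' new : List Char) : pyReplace1 (tdL ++ '>' :: p') tdO new = new ++ p' := by
  simp [tdL, tdO, pyReplace1, List.isPrefixOf]

lemma pyReplace1_notbare (p new : List Char) (hp : ¬ tdL <:+: p)
    (hh : p.head? ≠ some '>') : pyReplace1 (tdL ++ p) tdO new = tdL ++ p := by
  have hnp : ¬ tdO.isPrefixOf ('<' :: 't' :: 'd' :: p) = true := by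
    intro hpre
    rw [List.isPrefixOf_iff_prefix] at hpre
    rcases hpre with ⟨w, hw⟩
    simp [tdO] at hw
    cases p with
    | nil => simp at hw
    | cons a q =>
      simp at hh hw
      exact hh hw.1.symm
  have h0 : ¬ tdO <:+: p := by
    intro hinf
    exact hp (List.IsInfix.trans (List.IsPrefix.isInfix (by simp [tdL, tdO])) hinf)
  show pyReplace1 ('<' :: 't' :: 'd' :: p) tdO new = '<' :: 't' :: 'd' :: p
  rw [pyReplace1, if_neg (by simpa [tdL] using hnp)]
  rw [pyReplace1, if_neg (by simp [tdO, List.isPrefixOf])]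
  rw [pyReplace1, if_neg (by simp [tdO, List.isPrefixOf])]
  rw [pyReplace1_of_not_infix _ _ _ h0]

lemma isIn_tr_congr {x y : List Char} (h : trL <:+: x ↔ trL <:+: y) :
    PySem.Chars.isIn trL x = PySem.Chars.isIn trL y := by
  cases hb : PySem.Chars.isIn trL y with
  | false =>
    have hy := (PySem.Chars.isIn_eq_false_iff _ _).mp hb
    exact (PySem.Chars.isIn_eq_false_iff _ _).mpr (fun hx => hy (h.mp hx))
  | true =>
    exact (PySem.Chars.isIn_iff_infix _ _).mpr (h.mpr ((PySem.Chars.isIn_iff_infix _ _).mp hb))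

lemma replace1_chunk (p new : List Char) (hp : ¬ tdL <:+: p) :
    pyReplace1 (tdL ++ p) tdO new =
      (if p.head? = some '>' then new ++ p.tail else tdL ++ p) := by
  cases p with
  | nil => simpa using pyReplace1_notbare [] new hp (by simp)
  | cons c p' =>
    by_cases hc : c = '>'
    · subst hc; simp [pyReplace1_bare]
    · rw [pyReplace1_notbare _ new hp (by simp [hc])]
      simp [hc]

lemma tdClass_mem (k1 : Int) (repl : List Char) (h : tdClass k1 = some repl) :
    repl = clsRank ∨ repl = clsPts ∨ repl = clsNum := by
  unfold tdClass at h
  split_ifs at h <;> simp_all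

lemma chunk_eq (p : List Char) (k1 : Int) (hp : ¬ tdL <:+: p) :
    (if k1 = 1 then pyReplace1 (tdL ++ p) tdO clsRank
     else if k1 = 7 then pyReplace1 (tdL ++ p) tdO clsPts
     else if k1 = 3 ∨ k1 = 4 ∨ k1 = 5 ∨ k1 = 6 ∨ k1 = 8 then pyReplace1 (tdL ++ p) tdO clsNum
     else tdL ++ p) = chunkOf p k1 := by
  by_cases h1 : k1 = 1
  · simp only [h1, chunkOf, tdClass]
    exact replace1_chunk p clsRank hp
  · by_cases h7 : k1 = 7
    · subst h7
      rw [if_neg h1, if_pos rfl]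
      have : tdClass 7 = some clsPts := by decide
      simp only [chunkOf, this]
      exact replace1_chunk p clsPts hp
    · by_cases hm : k1 = 3 ∨ k1 = 4 ∨ k1 = 5 ∨ k1 = 6 ∨ k1 = 8
      · simp only [chunkOf, tdClass, if_neg h1, if_neg h7, if_pos hm]
        exact replace1_chunk p clsNum hp
      · simp only [chunkOf, tdClass, if_neg h1, if_neg h7, if_neg hm]

lemma tr_prefix_head {c : Char} {t : List Char} (h : trL <+: c :: t) : c = '<' := by
  rcases h with ⟨w, hw⟩
  simp [trL] at hw
  exact hw.1.symm

lemma infix_tr_cons {c : Char} {p : List Char} (hc : c ≠ '<') :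
    trL <:+: (c :: p) ↔ trL <:+: p := by
  rw [List.infix_cons_iff]
  constructor
  · rintro (hpre | h)
    · exact absurd (tr_prefix_head hpre) hc
    · exact h
  · exact Or.inr

lemma infix_tr_td_append (p : List Char) : trL <:+: (tdL ++ p) ↔ trL <:+: p := by
  show trL <:+: ('<' :: 't' :: 'd' :: p) ↔ _
  rw [List.infix_cons_iff, infix_tr_cons (by decide), infix_tr_cons (by decide)]
  constructor
  · rintro (hpre | h)
    · rcases hpre with ⟨w, hw⟩
      simp [trL] at hw
    · exact h
  · exact Or.inr

lemma infix_tr_cls_append (cls p : List Char)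
    (hc : cls = clsRank ∨ cls = clsPts ∨ cls = clsNum) :
    trL <:+: (cls ++ p) ↔ trL <:+: p := by
  rcases hc with rfl | rfl | rfl <;>
  · simp only [clsRank, clsPts, clsNum, trL, List.cons_append, List.infix_cons_iff,
      List.cons_prefix_cons]
    simp

lemma isIn_tr_chunkOf (p : List Char) (k1 : Int) :
    PySem.Chars.isIn trL (chunkOf p k1) = PySem.Chars.isIn trL p := by
  rcases hcl : tdClass k1 with _ | repl
  · simp only [chunkOf, hcl]
    exact isIn_tr_congr (infix_tr_td_append p)
  · simp only [chunkOf, hcl]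
    by_cases hh : p.head? = some '>'
    · rw [if_pos hh]
      cases p with
      | nil => simp at hh
      | cons c p' =>
        simp at hh
        subst hh
        refine isIn_tr_congr ?_
        rw [infix_tr_cls_append _ _ (tdClass_mem k1 repl hcl)]
        simp only [List.tail_cons]
        exact (infix_tr_cons (by decide)).symm
    · rw [if_neg hh]
      exact isIn_tr_congr (infix_tr_td_append p)

lemma tr_prefix_append {p rest : List Char} (hp : p ≠ [])
    (hr : rest = [] ∨ rest.head? = some '<') (h : trL <+: p ++ rest) : trL <+: p := by
  rcases h with ⟨w, hw⟩
  rcases p with _ | ⟨a, _ | ⟨b, _ | ⟨c, _ | ⟨d, _ | ⟨e, p5⟩⟩⟩⟩⟩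
  · exact absurd rfl hp
  · simp [trL] at hw
    rcases hr with rfl | hh
    · simp at hw
    · rw [← hw.2] at hh; simp at hh
  · simp [trL] at hw
    rcases hr with rfl | hh
    · simp at hw
    · rw [← hw.2.2] at hh; simp at hh
  · simp [trL] at hw
    rcases hr with rfl | hh
    · simp at hw
    · rw [← hw.2.2.2] at hh; simp at hh
  · simp [trL] at hw
    rcases hr with rfl | hh
    · simp at hw
    · rw [← hw.2.2.2.2] at hh; simp at hh
  · simp [trL] at hw ⊢
    exact ⟨hw.1, hw.2.1, hw.2.2.1, hw.2.2.2.1, hw.2.2.2.2.1⟩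

lemma td_prefix_append {p rest : List Char} (hp : p ≠ [])
    (hr : rest = [] ∨ rest.head? = some '<') (h : tdL <+: p ++ rest) : tdL <+: p := by
  rcases h with ⟨w, hw⟩
  rcases p with _ | ⟨a, _ | ⟨b, _ | ⟨c, p3⟩⟩⟩
  · exact absurd rfl hp
  · simp [tdL] at hw
    rcases hr with rfl | hh
    · simp at hw
    · rw [← hw.2] at hh; simp at hh
  · simp [tdL] at hw
    rcases hr with rfl | hh
    · simp at hw
    · rw [← hw.2.2] at hh; simp at hh
  · simp [tdL] at hw ⊢
    exact ⟨hw.1, hw.2.1, hw.2.2.1⟩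

-- altGo branch equations
lemma altGo_nil (k : Int) : altGo [] k = [] := by
  rw [altGo]

lemma altGo_tr (x : List Char) (k : Int) : altGo (trL ++ x) k = trL ++ altGo x 0 := by
  show altGo ('<' :: '/' :: 't' :: 'r' :: '>' :: x) k = trL ++ altGo x 0
  rw [altGo]
  rw [if_pos (by simp [trL, List.isPrefixOf])]
  simp [trL]

lemma altGo_td_bare (p' : List Char) (k : Int) {repl : List Char}
    (hcls : tdClass (k + 1) = some repl) :
    altGo (tdL ++ '>' :: p') k = repl ++ altGo p' (k + 1) := by
  show altGo ('<' :: 't' :: 'd' :: '>' :: p') k = repl ++ altGo p' (k + 1)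
  rw [altGo]
  rw [if_neg (by simp [trL, List.isPrefixOf])]
  rw [if_pos (by simp [tdL, List.isPrefixOf])]
  have hb : tdO.isPrefixOf ('<' :: 't' :: 'd' :: '>' :: p') = true := by
    simp [tdO, List.isPrefixOf]
  rw [hcls, hb]
  simp

lemma altGo_td_other (p : List Char) (k : Int)
    (h : tdClass (k + 1) = none ∨ (p.head? ≠ some '>')) :
    altGo (tdL ++ p) k = tdL ++ altGo p (k + 1) := by
  show altGo ('<' :: 't' :: 'd' :: p) k = tdL ++ altGo p (k + 1)
  rw [altGo]
  rw [if_neg (by simp [trL, List.isPrefixOf])]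
  rw [if_pos (by simp [tdL, List.isPrefixOf])]
  have hb : tdO.isPrefixOf ('<' :: 't' :: 'd' :: p) = (p.head? = some '>' : Bool) := by
    cases p with
    | nil => simp [tdO, List.isPrefixOf]
    | cons a q =>
      simp only [tdO, List.isPrefixOf, Bool.and_true, List.head?_cons, Option.some.injEq]
      rcases eq_or_ne a '>' with rfl | hne
      · simp
      · simp [hne, Ne.symm hne]
  rcases h with hno | hng
  · rw [hno]
    cases hbv : tdO.isPrefixOf ('<' :: 't' :: 'd' :: p) <;> simp [tdL]
  · rw [hb]
    have : (p.head? = some '>' : Bool) = false := by simpa using hng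
    rw [this]
    cases hcl : tdClass (k + 1) <;> simp [tdL]

lemma altGo_char (c : Char) (t : List Char) (k : Int)
    (h5 : ¬ trL <+: (c :: t)) (h3 : ¬ tdL <+: (c :: t)) :
    altGo (c :: t) k = c :: altGo t k := by
  rw [altGo]
  rw [if_neg (fun hp => h5 (List.isPrefixOf_iff_prefix.mp hp))]
  rw [if_neg (fun hp => h3 (List.isPrefixOf_iff_prefix.mp hp))]

-- MAIN: altGo copies a "<td"-free block verbatim, resetting the counter iff it contains "</tr>"
lemma altGo_block (p : List Char) : ∀ (rest : List Char) (k : Int),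
    ¬ tdL <:+: p → (rest = [] ∨ rest.head? = some '<') →
    altGo (p ++ rest) k =
      p ++ altGo rest (if PySem.Chars.isIn trL p then 0 else k) := by
  have key : ∀ (n : ℕ) (p : List Char), p.length ≤ n → ∀ (rest : List Char) (k : Int),
      ¬ tdL <:+: p → (rest = [] ∨ rest.head? = some '<') →
      altGo (p ++ rest) k = p ++ altGo rest (if PySem.Chars.isIn trL p then 0 else k) := by
    intro n
    induction n with
    | zero =>
      intro p hlen rest k _ _
      have : p = [] := List.eq_nil_of_length_eq_zero (Nat.le_zero.mp hlen)
      subst this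
      simp [PySem.Chars.isIn, PySem.Chars.find, PySem.Chars.find.go, trL]
    | succ n ih =>
      intro p hlen rest k hp hr
      cases p with
      | nil => simp [PySem.Chars.isIn, PySem.Chars.find, PySem.Chars.find.go, trL]
      | cons c t =>
        by_cases h5 : trL <+: ((c :: t) ++ rest)
        · have hpp : trL <+: (c :: t) := tr_prefix_append (by simp) hr h5
          obtain ⟨p2, hp2⟩ := hpp
          have hnt2 : ¬ tdL <:+: p2 := fun hi => hp (hp2 ▸ hi.trans ⟨trL, [], by simp⟩)
          have hlen2 : p2.length ≤ n := by
            have h2 := congrArg List.length hp2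
            simp [trL] at h2
            simp at hlen
            omega
          rw [← hp2, List.append_assoc, altGo_tr,
            ih p2 hlen2 rest 0 hnt2 hr]
          have h0 : (if PySem.Chars.isIn trL p2 then (0 : Int) else 0) = 0 := ite_self 0
          have htr : PySem.Chars.isIn trL (trL ++ p2) = true :=
            (PySem.Chars.isIn_iff_infix _ _).mpr ⟨[], p2, by simp⟩
          rw [h0, htr]
          simp
        · by_cases h3 : tdL <+: ((c :: t) ++ rest)
          · exact absurd (td_prefix_append (by simp) hr h3).isInfix hp
          · have hcons5 : ¬ trL <+: (c :: (t ++ rest)) := by simpa using h5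
            have hcons3 : ¬ tdL <+: (c :: (t ++ rest)) := by simpa using h3
            have hnt : ¬ tdL <:+: t := fun hi => hp (List.infix_cons_iff.mpr (Or.inr hi))
            have hiff : PySem.Chars.isIn trL (c :: t) = PySem.Chars.isIn trL t := by
              refine isIn_tr_congr ?_
              rw [List.infix_cons_iff]
              constructor
              · rintro (hpre | h)
                · exact absurd (hpre.trans (List.prefix_append _ _)) h5
                · exact h
              · exact Or.inr
            rw [List.cons_append, altGo_char c (t ++ rest) k hcons5 hcons3,
              ih t (by simpa using Nat.succ_le_succ_iff.mp hlen) rest k hnt hr, hiff]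
            simp
  exact fun rest k hp hr => key p.length p le_rfl rest k hp hr

-- MAIN2: altGo over the glued-back parts is A's eager per-part loop
lemma altGo_parts (ps : List (List Char)) : ∀ (k : Int),
    (∀ p ∈ ps, ¬ tdL <:+: p) →
    altGo (ps.flatMap (fun p => tdL ++ p)) k = goParts ps k := by
  induction ps with
  | nil => intro k _; simp [goParts, altGo_nil]
  | cons p ps ih =>
    intro k hps
    have hp : ¬ tdL <:+: p := hps p (List.mem_cons_self ..)
    have hps' : ∀ q ∈ ps, ¬ tdL <:+: q := fun q hq => hps q (List.mem_cons_of_mem _ hq)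
    have hshape : ps.flatMap (fun p => tdL ++ p) = [] ∨
        (ps.flatMap (fun p => tdL ++ p)).head? = some '<' := by
      cases ps with
      | nil => exact Or.inl rfl
      | cons q qs => exact Or.inr (by simp [tdL])
    rw [List.flatMap_cons, goParts]
    rcases hcl : tdClass (k + 1) with _ | repl
    · have hcond : tdClass (k + 1) = none ∨ ((p ++ ps.flatMap (fun p => tdL ++ p)).head? ≠ some '>') :=
        Or.inl hcl
      rw [List.append_assoc, altGo_td_other _ _ hcond,
        altGo_block p _ _ hp hshape, ih _ hps']
      simp [chunkOf, hcl]
    · by_cases hbare : p.head? = some '>'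
      · cases p with
        | nil => simp at hbare
        | cons a p' =>
          simp only [List.head?_cons, Option.some.injEq] at hbare
          subst hbare
          have heq : (tdL ++ '>' :: p') ++ ps.flatMap (fun p => tdL ++ p) =
              tdL ++ '>' :: (p' ++ ps.flatMap (fun p => tdL ++ p)) := by simp
          have hnt' : ¬ tdL <:+: p' := fun hi => hp (List.infix_cons_iff.mpr (Or.inr hi))
          rw [heq, altGo_td_bare _ _ hcl, altGo_block p' _ _ hnt' hshape, ih _ hps']
          have hin : PySem.Chars.isIn trL ('>' :: p') = PySem.Chars.isIn trL p' :=
            isIn_tr_congr (infix_tr_cons (by decide))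
          simp [chunkOf, hcl, hin]
      · have hcond : tdClass (k + 1) = none ∨ ((p ++ ps.flatMap (fun p => tdL ++ p)).head? ≠ some '>') := by
          refine Or.inr ?_
          cases p with
          | nil =>
            rcases hshape with hnil | hlt
            · simp [hnil]
            · simp [hlt]
          | cons a p' => simpa using hbare
        rw [List.append_assoc, altGo_td_other _ _ hcond,
          altGo_block p _ _ hp hshape, ih _ hps']
        have hchunk : chunkOf p (k + 1) = tdL ++ p := by
          simp [chunkOf, hcl, hbare]
        rw [hchunk]
        simp

-- A's fold is the eager per-part loop
lemma foldl_addTdStep (ps : List (List Char)) : ∀ (out : List (List Char)) (last : List Char) (k : Int),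
    (∀ p ∈ ps, ¬ tdL <:+: p) →
    ((ps.foldl addTdStep (out ++ [last], true, k)).1).flatten =
      (out ++ [last]).flatten ++ goParts ps (if PySem.Chars.isIn trL last then 0 else k) := by
  induction ps with
  | nil => intro out last k _; simp [goParts]
  | cons p ps ih =>
    intro out last k hps
    have hp : ¬ tdL <:+: p := hps p (List.mem_cons_self ..)
    have hps' : ∀ q ∈ ps, ¬ tdL <:+: q := fun q hq => hps q (List.mem_cons_of_mem _ hq)
    rw [List.foldl_cons]
    have hstep : addTdStep (out ++ [last], true, k) p =
        ((out ++ [last]) ++ [chunkOf p ((if PySem.Chars.isIn trL last then 0 else k) + 1)], true,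
          (if PySem.Chars.isIn trL last then 0 else k) + 1) := by
      simp only [addTdStep, Bool.true_eq_false, if_false, List.getLast?_concat, Option.getD_some]
      rw [chunk_eq p _ hp]
    rw [hstep, ih _ _ _ hps', isIn_tr_chunkOf, goParts]
    simp

-- ===== VERDICT (by name: the statement is the Claim_ definition above) =====
lemma flatMap_td_shape (ps : List (List Char)) :
    ps.flatMap (fun p => tdL ++ p) = [] ∨ (ps.flatMap (fun p => tdL ++ p)).head? = some '<' := by
  cases ps with
  | nil => exact Or.inl rfl
  | cons q qs => exact Or.inr (by simp [tdL])

theorem add_td_classes_spec : Claim_equal_add_td_classes := by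
  intro s _
  unfold Spec_add_td_classes add_td_classes add_td_classes_alt
  show String.ofList (PySem.Chars.join []
      (List.foldl addTdStep ([], false, 0) (PySem.Chars.splitOn s.toList tdL)).1) =
    String.ofList (altGo s.toList 0)
  rw [splitOn_eq, List.foldl_cons]
  have hstep : addTdStep ([], false, 0) (splitTd s.toList).1 =
      ([] ++ [(splitTd s.toList).1], true, 0) := rfl
  rw [hstep, joinNil,
    foldl_addTdStep _ _ _ _ (splitTd_parts_no_td s.toList)]
  conv_rhs => rw [← splitTd_recover s.toList]
  rw [altGo_block _ _ _ (splitTd_head_no_td _) (flatMap_td_shape _),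
    altGo_parts _ _ (splitTd_parts_no_td _)]
  have h0 : (if PySem.Chars.isIn trL (splitTd s.toList).1 then (0 : Int) else 0) = 0 := ite_self 0
  rw [h0]
  simp
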